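-- pv_equiv track=rewrite | github.com/thealper2/codewars-solutions | 7-kyu/drawing_a_cross.py | draw_a_cross
-- ===== SOURCE A (Python) =====
-- def draw_a_cross(n):
--     if n < 3:
--         return "Not possible to draw cross for grids less than 3x3!"
--     if n % 2 == 0:
--         return "Centered cross not possible!"
--
--     grid = []
--     for i in range(n):
--         row = []
--         for j in range(n):
--             if i == j or i + j == n - 1:
--                 row.append("x")
--             else:
--                 row.append(" ")
--         grid.append("".join(row))
--     return "\n".join(grid)
-- ===== SOURCE B (Python) =====
-- def draw_a_cross(n):
--     if n < 3:
--         return "Not possible to draw cross for grids less than 3x3!"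
--     if n % 2 == 0:
--         return "Centered cross not possible!"
--
--     mid = n // 2
--     top = [" " * i + "x" + " " * (n - 2 * i - 2) + "x" + " " * i for i in range(mid)]
--     middle = " " * mid + "x" + " " * mid
--     return "\n".join(top + [middle] + top[::-1])
-- ===== Notes on version B (the rewrite author's own statement) =====
-- stated objective: alternative
-- what changed: B uses the cross's horizontal mirror symmetry: it constructs only the top n//2 rows, each by arithmetic string concatenation (i spaces, 'x', n-2i-2 spaces, 'x', i spaces), builds the middle row separately, and emits top + [middle] + reversed(top), instead of A's nested loop testing every cell against the diagonal conditions.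
import Mathlib
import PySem

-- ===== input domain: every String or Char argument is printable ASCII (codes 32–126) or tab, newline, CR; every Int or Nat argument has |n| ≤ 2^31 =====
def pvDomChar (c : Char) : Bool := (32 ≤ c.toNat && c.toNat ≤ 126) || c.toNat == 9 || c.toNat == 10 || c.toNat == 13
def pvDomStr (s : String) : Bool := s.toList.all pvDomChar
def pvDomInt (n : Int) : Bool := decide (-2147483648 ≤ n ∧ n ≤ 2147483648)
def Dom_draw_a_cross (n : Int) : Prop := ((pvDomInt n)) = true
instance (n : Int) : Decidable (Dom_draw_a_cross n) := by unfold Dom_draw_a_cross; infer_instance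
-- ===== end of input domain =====

-- B exploits the cross's mirror symmetry: it builds only the top half of the rows by
-- arithmetic string construction (spaces/x/spaces/x/spaces), then emits top + middle + reversed top (alternative decomposition).

-- ===== PORT A =====
def draw_a_cross (n : Int) : String :=
  if n < 3 then "Not possible to draw cross for grids less than 3x3!"
  else if PySem.Int.mod n 2 = 0 then "Centered cross not possible!"
  else
    let grid := (PySem.List.pyRange 0 n 1).foldl (fun grid i =>
      let row := (PySem.List.pyRange 0 n 1).foldl (fun row j =>
        if i = j ∨ i + j = n - 1 then row ++ ['x'] else row ++ [' ']) ([] : List Char)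
      grid ++ [String.ofList row]) ([] : List String)
    PySem.Str.join "\n" grid

-- ===== PORT B =====
-- string concatenation and " " * i are ported on the List Char side (String.ofList of ++ / replicate);
-- top[::-1] is List.reverse (PySem.List.slice?_none_none_neg_one).
def draw_a_cross_alt (n : Int) : String :=
  if n < 3 then "Not possible to draw cross for grids less than 3x3!"
  else if PySem.Int.mod n 2 = 0 then "Centered cross not possible!"
  else
    let mid := PySem.Int.floordiv n 2
    let top := (PySem.List.pyRange 0 mid 1).map (fun i =>
      String.ofList (List.replicate i.toNat ' ' ++ ['x'] ++
        List.replicate (n - 2 * i - 2).toNat ' ' ++ ['x'] ++ List.replicate i.toNat ' '))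
    let middle := String.ofList (List.replicate mid.toNat ' ' ++ ['x'] ++ List.replicate mid.toNat ' ')
    PySem.Str.join "\n" (top ++ [middle] ++ top.reverse)

-- ===== PRECONDITION & SPEC =====
def Spec_draw_a_cross (n : Int) (out : String) : Prop := out = draw_a_cross_alt n
instance (n : Int) (out : String) : Decidable (Spec_draw_a_cross n out) := by unfold Spec_draw_a_cross; infer_instance

-- ===== CLAIM (what is proved, stated in full; the proofs are below) =====
def Claim_equal_draw_a_cross : Prop := ∀ (n : Int), Dom_draw_a_cross n → Spec_draw_a_cross n (draw_a_cross n)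

-- ===== LEMMAS AND PROOFS =====

-- the row A computes, in map form
def rowA (n i : Int) : List Char :=
  (PySem.List.pyRange 0 n 1).map (fun j => if i = j ∨ i + j = n - 1 then 'x' else ' ')

theorem rowA_symm (n i : Int) : rowA n (n - 1 - i) = rowA n i := by
  unfold rowA
  apply List.map_congr_left
  intro j _
  have : (n - 1 - i = j ∨ n - 1 - i + j = n - 1) ↔ (i = j ∨ i + j = n - 1) := by omega
  rw [if_congr this rfl rfl]

theorem rowA_arith (n i : Int) (hi0 : 0 ≤ i) (hin : 2 * i + 2 ≤ n) :
    rowA n i = List.replicate i.toNat ' ' ++ ['x'] ++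
      List.replicate (n - 2 * i - 2).toNat ' ' ++ ['x'] ++ List.replicate i.toNat ' ' := by
  unfold rowA
  rw [PySem.List.pyRange_one]
  apply List.ext_getElem
  · simp; omega
  · intro k hk₁ hk₂
    simp only [List.length_map, List.length_range] at hk₁
    simp only [List.getElem_map, List.getElem_range, List.getElem_append,
      List.length_append, List.length_replicate, List.length_singleton,
      List.getElem_replicate, List.getElem_singleton]
    split_ifs <;> first | rfl | (exfalso; omega)

theorem rowA_mid (n i : Int) (hi0 : 0 ≤ i) (hin : 2 * i + 1 = n) :
    rowA n i = List.replicate i.toNat ' ' ++ ['x'] ++ List.replicate i.toNat ' ' := by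
  unfold rowA
  rw [PySem.List.pyRange_one]
  apply List.ext_getElem
  · simp; omega
  · intro k hk₁ hk₂
    simp only [List.length_map, List.length_range] at hk₁
    simp only [List.getElem_map, List.getElem_range, List.getElem_append,
      List.length_append, List.length_replicate, List.length_singleton,
      List.getElem_replicate, List.getElem_singleton]
    split_ifs <;> first | rfl | (exfalso; omega)

-- ===== VERDICT (by name: the statement is the Claim_ definition above) =====
theorem draw_a_cross_spec : Claim_equal_draw_a_cross := by
  intro n _
  unfold Spec_draw_a_cross draw_a_cross draw_a_cross_alt
  split_ifs with h1 h2
  · rfl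
  · rfl
  · -- n ≥ 3, n odd
    apply congrArg (PySem.Str.join "\n")
    have hn3 : 3 ≤ n := by omega
    have hodd : n % 2 = 1 := by
      rw [PySem.Int.mod_eq_emod_of_pos (by omega)] at h2; omega
    obtain ⟨m, hm0, hm2⟩ : ∃ m : Int, 0 ≤ m ∧ 2 * m + 1 = n := ⟨(n - 1) / 2, by omega, by omega⟩
    have hfm : PySem.Int.floordiv n 2 = m := by
      rw [PySem.Int.floordiv_eq_ediv_of_pos (by omega)]; omega
    rw [hfm]
    -- A's grid in map form
    have hA : (PySem.List.pyRange 0 n 1).foldl (fun grid i =>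
        grid ++ [String.ofList ((PySem.List.pyRange 0 n 1).foldl (fun row j =>
          if i = j ∨ i + j = n - 1 then row ++ ['x'] else row ++ [' ']) ([] : List Char))])
        ([] : List String)
        = (PySem.List.pyRange 0 n 1).map (fun i => String.ofList (rowA n i)) := by
      rw [PySem.List.foldl_append_singleton_eq_map]
      simp only [List.nil_append]
      apply List.map_congr_left
      intro i _
      congr 1
      have hstep : (fun (row : List Char) j =>
          if i = j ∨ i + j = n - 1 then row ++ ['x'] else row ++ [' '])
          = fun row j => row ++ [if i = j ∨ i + j = n - 1 then 'x' else ' '] := by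
        funext row j; split_ifs <;> rfl
      rw [hstep, PySem.List.foldl_append_singleton_eq_map, List.nil_append]; rfl
    rw [hA]
    -- now elementwise
    apply List.ext_getElem
    · simp [PySem.List.length_pyRange_one]; omega
    · intro k hk₁ hk₂
      simp only [List.length_map, PySem.List.length_pyRange_one] at hk₁
      simp only [List.getElem_map, PySem.List.getElem_pyRange_one, List.getElem_append,
        List.length_append, List.length_map, List.getElem_reverse,
        PySem.List.length_pyRange_one, List.length_singleton, List.getElem_singleton,
        zero_add]
      split_ifs with c1 c2
      · -- top half: k < m
        rw [rowA_arith n (k : Int) (by omega) (by omega)]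
      · -- middle row
        rw [show ((k : Int)) = m from by omega, rowA_mid n m hm0 hm2]
      · -- bottom half: mirror of the top
        rw [show ((((m - 0).toNat - 1 - (k - ((m - 0).toNat + 1)) : Nat)) : Int)
              = n - 1 - (k : Int) from by omega,
          ← rowA_symm n (k : Int),
          rowA_arith n (n - 1 - (k : Int)) (by omega) (by omega)]
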